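-- pv_equiv track=rewrite | github.com/krstfpmbd20/course_u | apps/website/other.py | analyze_preparation_by_course
-- ===== SOURCE A (Python) =====
-- def analyze_preparation_by_course(extracted_data):
--     it_preparation_counts = {}
--     cs_preparation_counts = {}
--     for data_item in extracted_data:
--         course = data_item['course']
--         preparation_level = data_item['preparation']
--
--         if course == 'IT':
--             if preparation_level not in it_preparation_counts:
--                 it_preparation_counts[preparation_level] = 0
--             it_preparation_counts[preparation_level] += 1
--
--         elif course == 'CS':
--             if preparation_level not in cs_preparation_counts:
--                 cs_preparation_counts[preparation_level] = 0
--             cs_preparation_counts[preparation_level] += 1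
--
--     preparation_levels_by_course = {
--         'IT': it_preparation_counts,
--         'CS': cs_preparation_counts
--     }
--
--     return preparation_levels_by_course
-- ===== SOURCE B (Python) =====
-- def analyze_preparation_by_course(extracted_data):
--     pairs = [(d['course'], d['preparation']) for d in extracted_data]
--
--     def tally(course):
--         levels = [p for c, p in pairs if c == course]
--         return {p: levels.count(p) for p in dict.fromkeys(levels)}
--
--     return {'IT': tally('IT'), 'CS': tally('CS')}
-- ===== Notes on version B (the rewrite author's own statement) =====
-- stated objective: idiomatic
-- what changed: A's single branching loop mutating two count dicts is replaced by one pass materializing (course, preparation) pairs, then per-course filter + ordered dedup + count comprehensions.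
import Mathlib
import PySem

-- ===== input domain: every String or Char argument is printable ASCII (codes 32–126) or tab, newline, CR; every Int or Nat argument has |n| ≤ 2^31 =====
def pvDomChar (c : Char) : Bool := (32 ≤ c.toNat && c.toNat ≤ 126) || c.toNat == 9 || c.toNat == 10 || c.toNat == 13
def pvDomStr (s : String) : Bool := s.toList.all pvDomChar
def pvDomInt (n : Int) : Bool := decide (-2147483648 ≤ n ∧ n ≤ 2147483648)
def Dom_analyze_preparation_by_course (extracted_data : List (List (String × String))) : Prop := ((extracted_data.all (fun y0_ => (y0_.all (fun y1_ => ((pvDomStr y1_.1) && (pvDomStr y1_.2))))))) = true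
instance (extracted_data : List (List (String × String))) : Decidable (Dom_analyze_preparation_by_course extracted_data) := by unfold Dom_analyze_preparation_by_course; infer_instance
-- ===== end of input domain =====

-- B replaces A's single branching loop over two mutable count-dicts by a pairs pass followed by
-- per-course filter + ordered-dedup + count comprehensions (idiomatic decomposition, not faster).


-- ===== PORT A =====
-- loop body of A: branch on course, then "if not in: = 0" followed by "+= 1"
def pvA_step (s : PySem.Dict String Int × PySem.Dict String Int) (data_item : List (String × String)) :
    PySem.Dict String Int × PySem.Dict String Int :=
  let course := (PySem.Dict.mk data_item).getD "course" ""          -- data_item['course'] (Pre_ guarantees the key)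
  let prep := (PySem.Dict.mk data_item).getD "preparation" ""       -- data_item['preparation']
  if course == "IT" then
    let itc := if s.1.contains prep = false then s.1.insert prep 0 else s.1
    (itc.insert prep (itc.getD prep 0 + 1), s.2)
  else if course == "CS" then
    let csc := if s.2.contains prep = false then s.2.insert prep 0 else s.2
    (s.1, csc.insert prep (csc.getD prep 0 + 1))
  else s

def analyze_preparation_by_course (extracted_data : List (List (String × String))) : List (String × List (String × Int)) :=
  let r := extracted_data.foldl pvA_step (PySem.Dict.empty, PySem.Dict.empty)
  [("IT", r.1.items), ("CS", r.2.items)]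

-- ===== PORT B =====
-- pairs = [(d['course'], d['preparation']) for d in extracted_data]
def pvB_pairs (extracted_data : List (List (String × String))) : List (String × String) :=
  extracted_data.map (fun d => ((PySem.Dict.mk d).getD "course" "", (PySem.Dict.mk d).getD "preparation" ""))

-- tally(course): levels = [p for c, p in pairs if c == course]; {p: levels.count(p) for p in dict.fromkeys(levels)}
def pvB_tally (pairs : List (String × String)) (course : String) : List (String × Int) :=
  let levels := (pairs.filter (fun cp => cp.1 == course)).map (fun cp => cp.2)
  (PySem.List.dedup levels).map (fun p => (p, (levels.count p : Int)))

def analyze_preparation_by_course_alt (extracted_data : List (List (String × String))) : List (String × List (String × Int)) :=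
  let pairs := pvB_pairs extracted_data
  [("IT", pvB_tally pairs "IT"), ("CS", pvB_tally pairs "CS")]

-- ===== PRECONDITION & SPEC =====
-- Pre_ excludes items missing the 'course' or 'preparation' key, on which Python A raises KeyError.
def Pre_analyze_preparation_by_course (extracted_data : List (List (String × String))) : Prop :=
  ∀ item ∈ extracted_data, "course" ∈ item.map Prod.fst ∧ "preparation" ∈ item.map Prod.fst
instance (extracted_data : List (List (String × String))) : Decidable (Pre_analyze_preparation_by_course extracted_data) := by unfold Pre_analyze_preparation_by_course; infer_instance

def pvWitness_analyze_preparation_by_course : (List (List (String × String))) :=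
  [[("course", "IT"), ("preparation", "high")], [("course", "CS"), ("preparation", "low")]]

def Spec_analyze_preparation_by_course (extracted_data : List (List (String × String))) (out : List (String × List (String × Int))) : Prop := out = analyze_preparation_by_course_alt extracted_data
instance (extracted_data : List (List (String × String))) (out : List (String × List (String × Int))) : Decidable (Spec_analyze_preparation_by_course extracted_data out) := by unfold Spec_analyze_preparation_by_course; infer_instance

-- ===== CLAIM (what is proved, stated in full; the proofs are below) =====
def Claim_equal_analyze_preparation_by_course : Prop := ∀ (extracted_data : List (List (String × String))), Dom_analyze_preparation_by_course extracted_data → Pre_analyze_preparation_by_course extracted_data → Spec_analyze_preparation_by_course extracted_data (analyze_preparation_by_course extracted_data)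

-- ===== LEMMAS AND PROOFS =====

-- A's "if not in: = 0; += 1" is one insert of getD+1
theorem pvA_incr_eq (d : PySem.Dict String Int) (p : String) :
    (if d.contains p = false then d.insert p 0 else d).insert p
      ((if d.contains p = false then d.insert p 0 else d).getD p 0 + 1)
      = d.insert p (d.getD p 0 + 1) := by
  by_cases h : d.contains p = false
  · have hg : d.getD p 0 = 0 := PySem.Dict.getD_of_not_contains d 0 h
    simp [h, PySem.Dict.insert_insert_self, PySem.Dict.getD_insert_self, hg]
  · simp [h]

-- the loop over items is the loop over the (course, preparation) pairs
theorem pvA_foldl_map (l : List (List (String × String))) (s : PySem.Dict String Int × PySem.Dict String Int) :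
    l.foldl pvA_step s = (l.map (fun d => ((PySem.Dict.mk d).getD "course" "", (PySem.Dict.mk d).getD "preparation" ""))).foldl
      (fun s cp =>
        if cp.1 == "IT" then (s.1.insert cp.2 (s.1.getD cp.2 0 + 1), s.2)
        else if cp.1 == "CS" then (s.1, s.2.insert cp.2 (s.2.getD cp.2 0 + 1))
        else s) s := by
  induction l generalizing s with
  | nil => rfl
  | cons d l ih =>
      simp only [List.foldl_cons, List.map_cons]
      rw [ih]
      congr 1
      simp only [pvA_step]
      rw [pvA_incr_eq, pvA_incr_eq]

-- the branching pair loop splits into two filtered counting loops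
theorem pvA_split (l : List (String × String)) (d1 d2 : PySem.Dict String Int) :
    l.foldl
      (fun s cp =>
        if cp.1 == "IT" then (s.1.insert cp.2 (s.1.getD cp.2 0 + 1), s.2)
        else if cp.1 == "CS" then (s.1, s.2.insert cp.2 (s.2.getD cp.2 0 + 1))
        else s) (d1, d2)
    = (((l.filter (fun cp => cp.1 == "IT")).map (fun cp => cp.2)).foldl (fun d x => d.insert x (d.getD x 0 + 1)) d1,
       ((l.filter (fun cp => cp.1 == "CS")).map (fun cp => cp.2)).foldl (fun d x => d.insert x (d.getD x 0 + 1)) d2) := by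
  induction l generalizing d1 d2 with
  | nil => rfl
  | cons cp l ih =>
      simp only [List.foldl_cons, List.filter_cons]
      split_ifs with h1 h2 <;> simp_all

-- one filtered counting loop from empty yields exactly B's tally
theorem pvA_count_items (l : List (String × String)) (c : String) :
    (((l.filter (fun cp => cp.1 == c)).map (fun cp => cp.2)).foldl
        (fun d x => d.insert x (d.getD x 0 + 1)) PySem.Dict.empty).items = pvB_tally l c := by
  rw [PySem.Dict.foldl_insert_getD_add_one_eq_counter, PySem.Dict.items_counter]
  simp [pvB_tally]

-- ===== VERDICT (by name: the statement is the Claim_ definition above) =====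
theorem analyze_preparation_by_course_spec : Claim_equal_analyze_preparation_by_course := by
  intro extracted_data _ _
  show _ = _
  simp only [analyze_preparation_by_course, analyze_preparation_by_course_alt, pvB_pairs]
  rw [pvA_foldl_map, pvA_split, ← pvA_count_items _ "IT", ← pvA_count_items _ "CS"]
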